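-- pv_equiv track=rewrite | github.com/Thingybob8055/Dobot-Arm | server/render_letters.py | optimize_armcode
-- ===== SOURCE A (Python) =====
-- def optimize_armcode(armcode):
--     norel0 = [x for x in armcode if x!='m,0.0,0.0']
--     noud = []
--     for a,b in zip(norel0, norel0[1:]+['']):
--         if a=='u' and b=='d':
--             continue
--         noud.append(a)
--     norepeat = []
--     curpos = 'u'
--     for a in noud:
--         if a!=curpos:
--             norepeat.append(a)
--         if a=='u' or a=='d':
--             curpos = a
--     return norepeat
-- ===== SOURCE B (Python) =====
-- def optimize_armcode(armcode):
--     out = []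
--     pending = False  # a 'u' waiting for the next surviving token
--     cp = 'u'
--     for t in armcode:
--         if t == 'm,0.0,0.0':
--             continue
--         if pending:
--             pending = False
--             if t != 'd':
--                 # flush the pending 'u'
--                 if 'u' != cp:
--                     out.append('u')
--                 cp = 'u'
--         if t == 'u':
--             pending = True
--         else:
--             if t != cp:
--                 out.append(t)
--             if t == 'd':
--                 cp = t
--     if pending and 'u' != cp:
--         out.append('u')
--     return out
-- ===== Notes on version B (the rewrite author's own statement) =====
-- stated objective: alternative
-- what changed: Fuses A's three passes (filter, zip-based u/d lookahead, dedup loop) into one single-pass state machine over the input with a pending-'u' flag and current-position state.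
import Mathlib
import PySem

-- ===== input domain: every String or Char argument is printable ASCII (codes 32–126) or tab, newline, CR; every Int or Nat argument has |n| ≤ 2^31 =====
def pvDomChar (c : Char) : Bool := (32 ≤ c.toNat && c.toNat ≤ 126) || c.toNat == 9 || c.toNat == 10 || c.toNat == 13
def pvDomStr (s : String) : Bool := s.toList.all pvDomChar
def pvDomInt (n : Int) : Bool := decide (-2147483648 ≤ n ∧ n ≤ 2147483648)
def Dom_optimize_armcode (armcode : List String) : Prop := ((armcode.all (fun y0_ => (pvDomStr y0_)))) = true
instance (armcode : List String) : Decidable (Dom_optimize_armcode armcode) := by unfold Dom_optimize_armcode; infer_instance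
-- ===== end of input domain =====

-- B fuses A's three passes into one single-pass state machine with a pending-'u' flag; same cost, no speed claim.

-- ===== PORT A =====
def optimize_armcode (armcode : List String) : List String :=
  let norel0 := armcode.filter (fun x => x != "m,0.0,0.0")
  let noud := (norel0.zip (norel0.drop 1 ++ [""])).foldl
      (fun acc ab => if ab.1 == "u" && ab.2 == "d" then acc else acc ++ [ab.1]) []
  let st := noud.foldl
      (fun (st : String × List String) a =>
        ((if a == "u" || a == "d" then a else st.1),
         (if a != st.1 then st.2 ++ [a] else st.2))) ("u", [])
  st.2

-- ===== PORT B =====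
-- single pass; pending = a 'u' waiting for the next surviving token; cp = current position.
-- The Python's "clear pending, fall through to the common code" is the recursive call on the
-- same list with pending := false (lexicographic termination measure).
def pvGo (xs : List String) (pending : Bool) (cp : String) : List String :=
  match xs with
  | [] => if pending && ("u" != cp) then ["u"] else []
  | t :: rest =>
    if t == "m,0.0,0.0" then pvGo rest pending cp
    else if pending then
      if t == "d" then pvGo (t :: rest) false cp
      else (if "u" != cp then ["u"] else []) ++ pvGo (t :: rest) false "u"
    else if t == "u" then pvGo rest true cp
    else (if t != cp then [t] else []) ++ pvGo rest false (if t == "d" then "d" else cp)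
termination_by (xs.length, if pending then 1 else 0)
decreasing_by all_goals simp_all; omega

def optimize_armcode_alt (armcode : List String) : List String := pvGo armcode false "u"

-- ===== PRECONDITION & SPEC =====
def Spec_optimize_armcode (armcode : List String) (out : List String) : Prop := out = optimize_armcode_alt armcode
instance (armcode : List String) (out : List String) : Decidable (Spec_optimize_armcode armcode out) := by unfold Spec_optimize_armcode; infer_instance

-- ===== CLAIM (what is proved, stated in full; the proofs are below) =====
def Claim_equal_optimize_armcode : Prop := ∀ (armcode : List String), Dom_optimize_armcode armcode → Spec_optimize_armcode armcode (optimize_armcode armcode)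

-- ===== LEMMAS AND PROOFS =====

-- recursive characterisation of A's zip-lookahead pass
def pvNoud : List String → List String
  | [] => []
  | [a] => [a]
  | a :: b :: r => if a == "u" && b == "d" then pvNoud (b :: r) else a :: pvNoud (b :: r)

-- recursive characterisation of A's dedup pass
def pvDedup (cp : String) : List String → List String
  | [] => []
  | a :: r => (if a != cp then [a] else []) ++ pvDedup (if a == "u" || a == "d" then a else cp) r

theorem pvNoud_fold (f : List String) : ∀ (acc : List String),
    (f.zip (f.drop 1 ++ [""])).foldl
      (fun acc ab => if ab.1 == "u" && ab.2 == "d" then acc else acc ++ [ab.1]) acc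
    = acc ++ pvNoud f := by
  induction f using pvNoud.induct with
  | case1 => intro acc; simp [pvNoud]
  | case2 a => intro acc; simp [pvNoud]
  | case3 a b r h ih =>
      intro acc
      simp only [List.drop_succ_cons, List.drop_zero] at ih
      simp only [List.drop_succ_cons, List.drop_zero, List.cons_append, List.zip_cons_cons,
        List.foldl_cons, h, if_true]
      rw [ih]
      simp [pvNoud, h]
  | case4 a b r h ih =>
      intro acc
      simp only [List.drop_succ_cons, List.drop_zero] at ih
      simp only [List.drop_succ_cons, List.drop_zero, List.cons_append, List.zip_cons_cons,
        List.foldl_cons, if_neg h]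
      rw [ih]
      have e : pvNoud (a :: b :: r) = a :: pvNoud (b :: r) := by
        simp only [pvNoud, if_neg h]
      rw [e]; simp

theorem pvDedup_fold (l : List String) : ∀ (cp : String) (acc : List String),
    (l.foldl (fun (st : String × List String) a =>
        ((if a == "u" || a == "d" then a else st.1),
         (if a != st.1 then st.2 ++ [a] else st.2))) (cp, acc)).2
    = acc ++ pvDedup cp l := by
  induction l with
  | nil => intro cp acc; simp [pvDedup]
  | cons a r ih =>
      intro cp acc
      simp only [List.foldl_cons]
      rw [ih]
      by_cases h : (a != cp) = true <;> simp [pvDedup, h]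

theorem pvNoud_cons_ne (a : String) (f : List String) (h : (a == "u") = false) :
    pvNoud (a :: f) = a :: pvNoud f := by
  cases f <;> simp [pvNoud, h]

theorem pvGo_eq : ∀ (xs : List String) (pending : Bool) (cp : String),
    pvGo xs pending cp
    = pvDedup cp (pvNoud ((if pending then ["u"] else [])
        ++ xs.filter (fun x => x != "m,0.0,0.0"))) := by
  intro xs pending cp
  induction xs, pending, cp using pvGo.induct with
  | case1 pending cp h =>
      cases pending with
      | false => simp at h
      | true =>
          simp only [Bool.true_and] at h
          simp [pvGo, pvNoud, pvDedup, h]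
  | case2 pending cp h =>
      cases pending with
      | false => simp [pvGo, pvNoud, pvDedup]
      | true =>
          simp only [Bool.true_and] at h
          simp only [Bool.not_eq_true, bne_eq_false_iff_eq] at h
          subst h
          simp [pvGo, pvNoud, pvDedup]
  | case3 pending cp t rest h ih =>
      have ht : t = "m,0.0,0.0" := by simpa using h
      subst ht
      have step : pvGo ("m,0.0,0.0" :: rest) pending cp = pvGo rest pending cp := by
        rw [pvGo.eq_def]; simp
      rw [step, ih]
      simp
  | case4 cp t rest h1 h2 ih =>
      have ht : t = "d" := by simpa using h2
      subst ht
      have step : pvGo ("d" :: rest) true cp = pvGo ("d" :: rest) false cp := by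
        rw [pvGo.eq_def]; simp
      rw [step, ih]
      simp [pvNoud]
  | case5 cp t rest h1 h2 ih =>
      have hft : (t != "m,0.0,0.0") = true := by simpa using h1
      have step : pvGo (t :: rest) true cp
          = (if "u" != cp then ["u"] else []) ++ pvGo (t :: rest) false "u" := by
        rw [pvGo.eq_def]; simp [h1, h2]
      rw [step, ih]
      simp only [List.nil_append, if_true, List.cons_append, List.filter_cons, if_pos hft]
      rw [show pvNoud ("u" :: t :: List.filter (fun x => x != "m,0.0,0.0") rest)
            = "u" :: pvNoud (t :: List.filter (fun x => x != "m,0.0,0.0") rest) by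
        simp [pvNoud, h2]]
      simp [pvDedup]
  | case6 pending cp t rest h1 h2 h3 ih =>
      have hp : pending = false := by
        cases pending with
        | false => rfl
        | true => exact absurd rfl h2
      subst hp
      have ht : t = "u" := by simpa using h3
      subst ht
      have step : pvGo ("u" :: rest) false cp = pvGo rest true cp := by
        rw [pvGo.eq_def]; simp
      rw [step, ih]
      simp
  | case7 pending cp t rest h1 h2 h3 ih =>
      have hp : pending = false := by
        cases pending with
        | false => rfl
        | true => exact absurd rfl h2
      subst hp
      have hft : (t != "m,0.0,0.0") = true := by simpa using h1
      have hu : (t == "u") = false := by simpa using h3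
      have step : pvGo (t :: rest) false cp
          = (if t != cp then [t] else [])
            ++ pvGo rest false (if t == "d" then "d" else cp) := by
        rw [pvGo.eq_def]; simp [h1, hu]
      rw [step]
      simp only [List.nil_append, if_neg (by simp : ¬ (false = true)), List.filter_cons,
        if_pos hft] at ih ⊢
      rw [pvNoud_cons_ne t _ hu]
      simp only [pvDedup, hu, Bool.false_or]
      by_cases hd : (t == "d") = true
      · have htd : t = "d" := by simpa using hd
        subst htd
        rw [dif_pos hd] at ih
        simp only [if_pos hd]
        rw [ih]
      · rw [dif_neg hd] at ih
        simp only [if_neg hd]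
        rw [ih]

-- ===== VERDICT (by name: the statement is the Claim_ definition above) =====
theorem optimize_armcode_spec : Claim_equal_optimize_armcode := by
  intro armcode _
  show optimize_armcode armcode = optimize_armcode_alt armcode
  rw [optimize_armcode_alt, pvGo_eq]
  simp only [optimize_armcode, if_neg (by simp : ¬ (false = true)), List.nil_append]
  rw [pvNoud_fold, pvDedup_fold]
  simp
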